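-- pv_equiv track=rewrite | github.com/PassionSoftIan/algo_baekjoon_auto | 프로그래머스/unrated/250136. ［PCCP 기출문제］ 2번 ／ 석유 시추/［PCCP 기출문제］ 2번 ／ 석유 시추.py | solution
-- ===== SOURCE A (Python) =====
-- from collections import deque
--
-- dy = [0, 1, 0, -1]
--
-- dx = [1, 0, -1, 0]
--
-- def solution(land):
--     N = len(land)
--     M = len(land[0])
--
--     visited = [[0] * M for _ in range(N)]
--     check = [0] * M
--
--     def bfs(que):
--         q = deque([que])
--         count = 1
--         result = []
--         while q:
--             n, m = q.popleft()
--             if m not in result: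
--                 result.append(m)
--             for k in range(4):
--                 ny = n + dy[k]
--                 nx = m + dx[k]
--                 if 0 <= ny < N and 0 <= nx < M:
--                     if land[ny][nx] == 1 and visited[ny][nx] == 0:
--                         q.append([ny, nx])
--                         visited[ny][nx] = 1
--                         count += 1
--         while result:
--             line = result.pop()
--             check[line] += count
--
--     for i in range(N):
--         for j in range(M):
--             if land[i][j] == 1 and visited[i][j] == 0:
--                 visited[i][j] = 1
--                 bfs([i, j])
--
--     return max(check)
-- ===== SOURCE B (Python) =====
-- def _column_total(comp, sizes, N, j):
--     total = 0
--     seen = set()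
--     for i in range(N):
--         c = comp[i][j]
--         if c != -1 and c not in seen:
--             total += sizes[c]
--             seen.add(c)
--     return total
--
-- def solution(land):
--     N = len(land)
--     M = len(land[0])
--     comp = [[-1] * M for _ in range(N)]
--     sizes = []
--     for i in range(N):
--         for j in range(M):
--             if land[i][j] == 1 and comp[i][j] == -1:
--                 cid = len(sizes)
--                 q = [(i, j)]
--                 h = 0
--                 comp[i][j] = cid
--                 while h < len(q):
--                     y, x = q[h]
--                     for ny, nx in ((y, x + 1), (y + 1, x), (y, x - 1), (y - 1, x)):
--                         if 0 <= ny < N and 0 <= nx < M and land[ny][nx] == 1 and comp[ny][nx] == -1: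
--                             comp[ny][nx] = cid
--                             q.append((ny, nx))
--                     h += 1
--                 sizes.append(len(q))
--     best = 0
--     for j in range(M):
--         t = _column_total(comp, sizes, N, j)
--         if t > best:
--             best = t
--     return best
-- ===== Notes on version B (the rewrite author's own statement) =====
-- stated objective: alternative
-- what changed: replaces A's per-component bookkeeping (BFS deque, per-push cell counter, distinct-column result list, in-place check[] updates after each component) by two-phase component labelling: an index-pointer BFS over a growing list assigns component ids into a label grid plus a size table, then a separate per-column pass sums the sizes of the distinct labels occurring in that column
import Mathlib
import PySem

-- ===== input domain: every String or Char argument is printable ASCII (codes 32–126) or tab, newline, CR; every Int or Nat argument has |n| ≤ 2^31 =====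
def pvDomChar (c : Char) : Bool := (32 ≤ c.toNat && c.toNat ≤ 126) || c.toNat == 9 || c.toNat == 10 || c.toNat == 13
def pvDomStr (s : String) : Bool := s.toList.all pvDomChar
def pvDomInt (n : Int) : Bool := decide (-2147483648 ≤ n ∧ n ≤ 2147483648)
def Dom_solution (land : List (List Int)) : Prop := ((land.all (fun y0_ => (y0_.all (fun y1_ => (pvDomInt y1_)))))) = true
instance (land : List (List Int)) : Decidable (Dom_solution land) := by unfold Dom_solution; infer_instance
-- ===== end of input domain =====

-- B replaces A's per-component check-array bookkeeping (BFS deque + distinct-column list + in-place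
-- check updates) by a component-labelling pass (index-pointer BFS over a growing list, component ids
-- and sizes) followed by a per-column aggregation over distinct labels; same values, alternative shape.

-- ===== PORT A =====
-- land[y][x] with a row default / element default (all reads in both programs are guarded in range)
def pvGet2 (d : Int) (g : List (List Int)) (y x : Int) : Int :=
  PySem.List.pyGetD (PySem.List.pyGetD g y []) x d

-- g[y][x] = v
def pvSet2 (g : List (List Int)) (y x v : Int) : List (List Int) :=
  PySem.List.pySetD g y (PySem.List.pySetD (PySem.List.pyGetD g y []) x v)

def dyA : List Int := [0, 1, 0, -1]
def dxA : List Int := [1, 0, -1, 0]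

-- one iteration k of A's 'for k in range(4)' neighbour loop; state (queue-rest, visited, count)
def stepA (land : List (List Int)) (N M n m : Int)
    (s : List (Int × Int) × List (List Int) × Int) (k : Int) :
    List (Int × Int) × List (List Int) × Int :=
  let ny := n + PySem.List.pyGetD dyA k 0
  let nx := m + PySem.List.pyGetD dxA k 0
  if 0 ≤ ny ∧ ny < N ∧ 0 ≤ nx ∧ nx < M ∧ pvGet2 0 land ny nx = 1 ∧ pvGet2 0 s.2.1 ny nx = 0 then
    (s.1 ++ [(ny, nx)], pvSet2 s.2.1 ny nx 1, s.2.2 + 1)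
  else s

-- A's 'while q:' loop (fuel-guarded; the fuel passed below always suffices)
def bfsA (land : List (List Int)) (N M : Int) :
    Nat → List (Int × Int) → List (List Int) → Int → List Int →
    List (List Int) × Int × List Int
  | 0, _, visited, count, result => (visited, count, result)
  | _ + 1, [], visited, count, result => (visited, count, result)
  | fuel + 1, (n, m) :: rest, visited, count, result =>
    let result' := if m ∈ result then result else result ++ [m]
    let s := (PySem.List.pyRange 0 4 1).foldl (stepA land N M n m) (rest, visited, count)
    bfsA land N M fuel s.1 s.2.1 s.2.2 result'

-- 'check[line] += count'
def bumpA (count : Int) (check : List Int) (line : Int) : List Int :=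
  PySem.List.pySetD check line (PySem.List.pyGetD check line 0 + count)

def solution (land : List (List Int)) : Int :=
  let N : Int := (land.length : Int)
  let row0 := PySem.List.pyGetD land 0 []
  let M : Int := (row0.length : Int)
  let fuel : Nat := land.length * row0.length + 1
  let st := (PySem.List.pyRange 0 N 1).foldl (fun st i =>
      (PySem.List.pyRange 0 M 1).foldl (fun (st : List (List Int) × List Int) j =>
        if pvGet2 0 land i j = 1 ∧ pvGet2 0 st.1 i j = 0 then
          let r := bfsA land N M fuel [(i, j)] (pvSet2 st.1 i j 1) 1 []
          (r.1, (r.2.2.reverse).foldl (bumpA r.2.1) st.2)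
        else st) st)
    (List.replicate land.length (List.replicate row0.length 0),
     List.replicate row0.length (0 : Int))
  match PySem.List.max? st.2 (fun v => v) with
  | some v => v
  | none => 0

-- ===== PORT B =====
def nbrsB (y x : Int) : List (Int × Int) := [(y, x + 1), (y + 1, x), (y, x - 1), (y - 1, x)]

-- body of B's 'for ny, nx in …' over one neighbour; state (q, comp)
def stepB (land : List (List Int)) (N M cid : Int)
    (s : List (Int × Int) × List (List Int)) (c : Int × Int) :
    List (Int × Int) × List (List Int) :=
  if 0 ≤ c.1 ∧ c.1 < N ∧ 0 ≤ c.2 ∧ c.2 < M ∧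
      pvGet2 0 land c.1 c.2 = 1 ∧ pvGet2 (-1) s.2 c.1 c.2 = -1 then
    (s.1 ++ [c], pvSet2 s.2 c.1 c.2 cid)
  else s

-- B's 'while h < len(q):' loop (fuel-guarded; the fuel passed below always suffices)
def bfsB (land : List (List Int)) (N M cid : Int) :
    Nat → List (Int × Int) → Int → List (List Int) →
    List (Int × Int) × Int × List (List Int)
  | 0, q, h, comp => (q, h, comp)
  | fuel + 1, q, h, comp =>
    if h < (q.length : Int) then
      let yx := PySem.List.pyGetD q h (0, 0)
      let s := (nbrsB yx.1 yx.2).foldl (stepB land N M cid) (q, comp)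
      bfsB land N M cid fuel s.1 (h + 1) s.2
    else (q, h, comp)

-- body of _column_total's 'for i in range(N)'; state (total, seen)
def colScanB (comp : List (List Int)) (sizes : List Int) (j : Int)
    (s : Int × List Int) (i : Int) : Int × List Int :=
  let c := pvGet2 (-1) comp i j
  if c ≠ -1 ∧ c ∉ s.2 then (s.1 + PySem.List.pyGetD sizes c 0, PySem.Set.add s.2 c)
  else s

-- B's helper _column_total(comp, sizes, N, j)
def colTotal (comp : List (List Int)) (sizes : List Int) (N j : Int) : Int :=
  ((PySem.List.pyRange 0 N 1).foldl (colScanB comp sizes j) (0, PySem.Set.empty)).1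

def solution_alt (land : List (List Int)) : Int :=
  let N : Int := (land.length : Int)
  let row0 := PySem.List.pyGetD land 0 []
  let M : Int := (row0.length : Int)
  let fuel : Nat := land.length * row0.length + 1
  let st := (PySem.List.pyRange 0 N 1).foldl (fun st i =>
      (PySem.List.pyRange 0 M 1).foldl (fun (st : List (List Int) × List Int) j =>
        if pvGet2 0 land i j = 1 ∧ pvGet2 (-1) st.1 i j = -1 then
          let cid : Int := (st.2.length : Int)
          let r := bfsB land N M cid fuel [(i, j)] 0 (pvSet2 st.1 i j cid)
          (r.2.2, st.2 ++ [(r.1.length : Int)])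
        else st) st)
    (List.replicate land.length (List.replicate row0.length (-1 : Int)), ([] : List Int))
  (PySem.List.pyRange 0 M 1).foldl (fun best j =>
      let t := colTotal st.1 st.2 N j
      if t > best then t else best) 0

-- ===== PRECONDITION & SPEC =====
-- Pre excludes exactly the inputs where A raises: empty land (IndexError on land[0]),
-- an empty first row (max([]) ValueError), and a row shorter than len(land[0]) (IndexError
-- in the outer scan). A returns normally on every other input.
def Pre_solution (land : List (List Int)) : Prop :=
  land ≠ [] ∧ PySem.List.pyGetD land 0 [] ≠ [] ∧
    ∀ row ∈ land, (PySem.List.pyGetD land 0 []).length ≤ row.length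

instance (land : List (List Int)) : Decidable (Pre_solution land) := by
  unfold Pre_solution; infer_instance

def pvWitness_solution : List (List Int) := [[1, 0], [1, 1]]

def Spec_solution (land : List (List Int)) (out : Int) : Prop := out = solution_alt land
instance (land : List (List Int)) (out : Int) : Decidable (Spec_solution land out) := by unfold Spec_solution; infer_instance

-- ===== CLAIM (what is proved, stated in full; the proofs are below) =====
def Claim_equal_solution : Prop := ∀ (land : List (List Int)), Dom_solution land → Pre_solution land → Spec_solution land (solution land)

-- ===== LEMMAS AND PROOFS =====

-- generic relational fold
theorem pvFoldlRel {a b g : Type} (R : a → b → Prop) (f : a → g → a) (gg : b → g → b)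
    (L : List g) {x : a} {y : b} (h0 : R x y)
    (hstep : ∀ c ∈ L, ∀ x y, R x y → R (f x c) (gg y c)) :
    R (L.foldl f x) (L.foldl gg y) := by
  induction L generalizing x y with
  | nil => exact h0
  | cons c t ih =>
    exact ih (hstep c (by simp) x y h0) (fun d hd => hstep d (by simp [hd]))

def vis2 (c : Int) : Int := if c = -1 then 0 else 1

def c2v (g : List (List Int)) : List (List Int) := g.map (fun row => row.map vis2)

theorem pvGet2_c2v (g : List (List Int)) (y x : Int) :
    pvGet2 0 (c2v g) y x = vis2 (pvGet2 (-1) g y x) := by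
  unfold pvGet2 c2v
  have h1 : PySem.List.pyGetD (g.map (fun row => row.map vis2)) y ([] : List Int)
      = (PySem.List.pyGetD g y []).map vis2 := by
    simpa using PySem.List.pyGetD_map (fun row => row.map vis2) g y []
  rw [h1]
  have h2 := PySem.List.pyGetD_map vis2 (PySem.List.pyGetD g y []) x (-1)
  simpa [vis2] using h2

theorem vis2_eq_zero (c : Int) : vis2 c = 0 ↔ c = -1 := by
  unfold vis2; split <;> simp_all

def gShape (g : List (List Int)) (n m : Nat) : Prop :=
  g.length = n ∧ ∀ row ∈ g, row.length = m

theorem vis2_neg_one : vis2 (-1) = 0 := by decide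

theorem c2v_replicate (n m : Nat) :
    c2v (List.replicate n (List.replicate m (-1))) = List.replicate n (List.replicate m 0) := by
  simp only [c2v, List.map_replicate, vis2_neg_one]

theorem gShape_replicate (n m : Nat) :
    gShape (List.replicate n (List.replicate m (-1 : Int))) n m := by
  constructor
  · simp
  · intro row hrow
    rw [List.eq_of_mem_replicate hrow]
    simp

theorem pvGet2_eq_getD {y x : Int} (g : List (List Int)) (d : Int) (hy : 0 ≤ y) (hx : 0 ≤ x) :
    pvGet2 d g y x = (g.getD y.toNat []).getD x.toNat d := by
  unfold pvGet2
  rw [PySem.List.pyGetD_of_nonneg g [] hy, PySem.List.pyGetD_of_nonneg _ d hx]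

theorem pyGetD_eq_get? {α : Type} (xs : List α) (i : Int) (d : α) :
    PySem.List.pyGetD xs i d = (PySem.List.pyGet? xs i).getD d := rfl

theorem pvGet2_replicate (n m : Nat) (y x : Int) :
    pvGet2 (-1) (List.replicate n (List.replicate m (-1 : Int))) y x = -1 := by
  unfold pvGet2
  have hrow : PySem.List.pyGetD (List.replicate n (List.replicate m (-1 : Int))) y []
        = List.replicate m (-1) ∨
      PySem.List.pyGetD (List.replicate n (List.replicate m (-1 : Int))) y [] = [] := by
    cases h : PySem.List.pyGet? (List.replicate n (List.replicate m (-1 : Int))) y with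
    | none => right; rw [pyGetD_eq_get?, h]; rfl
    | some r =>
      left
      rw [pyGetD_eq_get?, h]
      exact List.eq_of_mem_replicate (PySem.List.mem_of_pyGet?_eq_some _ h)
  rcases hrow with h | h <;> rw [h]
  · cases h2 : PySem.List.pyGet? (List.replicate m (-1 : Int)) x with
    | none => rw [pyGetD_eq_get?, h2]; rfl
    | some v =>
      rw [pyGetD_eq_get?, h2]
      exact List.eq_of_mem_replicate (PySem.List.mem_of_pyGet?_eq_some _ h2)
  · cases h3 : PySem.List.pyGet? ([] : List Int) x with
    | none => rw [pyGetD_eq_get?, h3]; rfl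
    | some v => exact absurd (PySem.List.mem_of_pyGet?_eq_some _ h3) (by simp)

theorem pvSet2_eq_set {y : Int} (g : List (List Int)) (x v : Int) (hy : 0 ≤ y) :
    pvSet2 g y x v = g.set y.toNat (PySem.List.pySetD (g.getD y.toNat []) x v) := by
  unfold pvSet2
  rw [PySem.List.pySetD_of_nonneg _ _ hy, PySem.List.pyGetD_of_nonneg g [] hy]

theorem gShape_set2 {g : List (List Int)} {n m : Nat} (h : gShape g n m)
    {y x : Int} (v : Int) (hy : 0 ≤ y) (hx : 0 ≤ x) : gShape (pvSet2 g y x v) n m := by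
  obtain ⟨h1, h2⟩ := h
  rw [pvSet2_eq_set g x v hy]
  constructor
  · simp [h1]
  · intro row hrow
    rcases Nat.lt_or_ge y.toNat g.length with hlt | hge
    · rcases List.mem_or_eq_of_mem_set hrow with hold | hnew
      · exact h2 _ hold
      · subst hnew
        rw [PySem.List.length_pySetD]
        have : g.getD y.toNat [] = g[y.toNat] := by
          rw [List.getD_eq_getElem?_getD, List.getElem?_eq_getElem hlt]
          rfl
        rw [this]
        exact h2 _ (List.getElem_mem hlt)
    · rw [List.set_eq_of_length_le hge] at hrow
      exact h2 _ hrow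

theorem pvGet2_set2 {g : List (List Int)} {n m : Nat} (h : gShape g n m)
    {y x : Int} (v : Int) (hy : 0 ≤ y) (hyn : y < (n : Int)) (hx : 0 ≤ x) (hxm : x < (m : Int))
    {y' x' : Int} (d : Int) (hy' : 0 ≤ y') (hx' : 0 ≤ x') :
    pvGet2 d (pvSet2 g y x v) y' x' =
      if y' = y ∧ x' = x then v else pvGet2 d g y' x' := by
  obtain ⟨h1, h2⟩ := h
  have hyg : y.toNat < g.length := by omega
  have hgetrow : g.getD y.toNat [] = g[y.toNat] := by
    rw [List.getD_eq_getElem?_getD, List.getElem?_eq_getElem hyg]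
    rfl
  have hrow : (g.getD y.toNat []).length = m := by
    rw [hgetrow]; exact h2 _ (List.getElem_mem hyg)
  have hxg : x.toNat < (g.getD y.toNat []).length := by omega
  rw [pvSet2_eq_set g x v hy, pvGet2_eq_getD _ d hy' hx', pvGet2_eq_getD _ d hy' hx']
  rw [PySem.List.pySetD_of_nonneg _ _ hx]
  by_cases hyy : y' = y
  · subst hyy
    rw [List.getD_eq_getElem?_getD (l := g.set y'.toNat _)]
    rw [List.getElem?_set]
    rw [if_pos rfl, if_pos hyg]
    simp only [Option.getD_some]
    by_cases hxx : x' = x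
    · subst hxx
      simp only [and_self, if_true]
      rw [List.getD_eq_getElem?_getD, List.getElem?_set, if_pos rfl, if_pos hxg]
      rfl
    · rw [if_neg (by tauto)]
      rw [List.getD_eq_getElem?_getD, List.getElem?_set, if_neg (by omega)]
      simp [List.getD_eq_getElem?_getD]
  · rw [if_neg (by tauto)]
    rw [List.getD_eq_getElem?_getD (l := g.set y.toNat _), List.getElem?_set, if_neg (by omega)]
    simp [List.getD_eq_getElem?_getD]

theorem c2v_set2 {g : List (List Int)} {y x : Int} (v : Int) (hy : 0 ≤ y) (hx : 0 ≤ x) :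
    c2v (pvSet2 g y x v) = pvSet2 (c2v g) y x (vis2 v) := by
  rw [pvSet2_eq_set g x v hy, pvSet2_eq_set (c2v g) x (vis2 v) hy]
  unfold c2v
  rw [List.map_set]
  congr 1
  have hrow : (List.map (fun row => List.map vis2 row) g).getD y.toNat []
      = List.map vis2 (g.getD y.toNat []) := by
    rw [List.getD_eq_getElem?_getD, List.getD_eq_getElem?_getD, List.getElem?_map]
    cases g[y.toNat]? <;> simp
  rw [hrow]
  rw [PySem.List.pySetD_of_nonneg _ _ hx, PySem.List.pySetD_of_nonneg _ _ hx]
  rw [List.map_set]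

-- value of pyGetD with nonnegative entries
theorem pyGetD_nonneg_of_all {sizes : List Int} (hs : ∀ s ∈ sizes, 0 ≤ s) (c : Int) :
    0 ≤ PySem.List.pyGetD sizes c 0 := by
  cases h : PySem.List.pyGet? sizes c with
  | none => rw [PySem.List.pyGetD_of_none sizes c 0 h]
  | some v =>
    have hv : PySem.List.pyGetD sizes c 0 = v := by
      unfold PySem.List.pyGetD
      simp [h]
    rw [hv]
    exact hs v (PySem.List.mem_of_pyGet?_eq_some sizes h)

theorem pvSetAdd (s : List Int) (x : Int) :
    PySem.Set.add s x = if x ∈ s then s else s ++ [x] := by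
  unfold PySem.Set.add
  rcases Classical.em (x ∈ s) with h | h
  · rw [if_pos (by simpa using h), if_pos h]
  · rw [if_neg (by simpa using h), if_neg h]

theorem ofList_snoc (l : List Int) (x : Int) :
    PySem.Set.ofList (l ++ [x]) = if x ∈ PySem.Set.ofList l then PySem.Set.ofList l
      else PySem.Set.ofList l ++ [x] := by
  rw [← pvSetAdd]
  rw [PySem.Set.ofList_eq_foldl, PySem.Set.ofList_eq_foldl, List.foldl_append]
  rfl

def cellsOK (n m : Nat) (q : List (Int × Int)) : Prop :=
  ∀ c ∈ q, 0 ≤ c.1 ∧ c.1 < (n : Int) ∧ 0 ≤ c.2 ∧ c.2 < (m : Int)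

def labelsEq (comp0 : List (List Int)) (cid : Int) (q : List (Int × Int))
    (comp : List (List Int)) : Prop :=
  ∀ y x : Int, 0 ≤ y → 0 ≤ x →
    pvGet2 (-1) comp y x = if (y, x) ∈ q then cid else pvGet2 (-1) comp0 y x

def BCore (comp0 : List (List Int)) (n m : Nat) (cid : Int)
    (q : List (Int × Int)) (comp : List (List Int)) : Prop :=
  gShape comp n m ∧ labelsEq comp0 cid q comp ∧ q.Nodup ∧ cellsOK n m q ∧
    ∀ c ∈ q, pvGet2 (-1) comp0 c.1 c.2 = -1

theorem q_len_le {n m : Nat} {q : List (Int × Int)} (hnd : q.Nodup) (hok : cellsOK n m q) :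
    q.length ≤ n * m := by
  classical
  have hsub : q.toFinset ⊆
      Finset.Icc (0 : Int) ((n : Int) - 1) ×ˢ Finset.Icc (0 : Int) ((m : Int) - 1) := by
    intro c hc
    rw [List.mem_toFinset] at hc
    obtain ⟨h1, h2, h3, h4⟩ := hok c hc
    rw [Finset.mem_product, Finset.mem_Icc, Finset.mem_Icc]
    omega
  have hcard := Finset.card_le_card hsub
  rw [Finset.card_product, Int.card_Icc, Int.card_Icc, List.toFinset_card_of_nodup hnd] at hcard
  have h1 : ((n : Int) - 1 + 1 - 0).toNat = n := by omega
  have h2 : ((m : Int) - 1 + 1 - 0).toNat = m := by omega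
  rw [h1, h2] at hcard
  exact hcard

def stepACell (land : List (List Int)) (N M : Int)
    (s : List (Int × Int) × List (List Int) × Int) (c : Int × Int) :
    List (Int × Int) × List (List Int) × Int :=
  if 0 ≤ c.1 ∧ c.1 < N ∧ 0 ≤ c.2 ∧ c.2 < M ∧ pvGet2 0 land c.1 c.2 = 1 ∧
      pvGet2 0 s.2.1 c.1 c.2 = 0 then
    (s.1 ++ [(c.1, c.2)], pvSet2 s.2.1 c.1 c.2 1, s.2.2 + 1)
  else s

theorem stepA_eq_cell (land : List (List Int)) (N M n m : Int)
    (s : List (Int × Int) × List (List Int) × Int) (k : Int) :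
    stepA land N M n m s k
      = stepACell land N M s (n + PySem.List.pyGetD dyA k 0, m + PySem.List.pyGetD dxA k 0) := rfl

theorem foldA_eq (land : List (List Int)) (N M n m : Int)
    (s : List (Int × Int) × List (List Int) × Int) :
    (PySem.List.pyRange 0 4 1).foldl (stepA land N M n m) s
      = (nbrsB n m).foldl (stepACell land N M) s := by
  have h4 : PySem.List.pyRange 0 4 1 = [0, 1, 2, 3] := by decide
  rw [h4]
  have e0 : PySem.List.pyGetD dyA 0 0 = 0 := by decide
  have e1 : PySem.List.pyGetD dyA 1 0 = 1 := by decide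
  have e2 : PySem.List.pyGetD dyA 2 0 = 0 := by decide
  have e3 : PySem.List.pyGetD dyA 3 0 = -1 := by decide
  have f0 : PySem.List.pyGetD dxA 0 0 = 1 := by decide
  have f1 : PySem.List.pyGetD dxA 1 0 = 0 := by decide
  have f2 : PySem.List.pyGetD dxA 2 0 = -1 := by decide
  have f3 : PySem.List.pyGetD dxA 3 0 = 0 := by decide
  simp only [List.foldl, stepA_eq_cell, nbrsB, e0, e1, e2, e3, f0, f1, f2, f3,
    add_zero, ← sub_eq_add_neg]

def MidRel (comp0 : List (List Int)) (n m : Nat) (cid : Int) (q0 : List (Int × Int)) (k : Nat)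
    (sA : List (Int × Int) × List (List Int) × Int)
    (sB : List (Int × Int) × List (List Int)) : Prop :=
  BCore comp0 n m cid sB.1 sB.2 ∧ q0 <+: sB.1 ∧ k ≤ sB.1.length ∧
    sA.1 = sB.1.drop k ∧ sA.2.1 = c2v sB.2 ∧ sA.2.2 = (sB.1.length : Int)

theorem push_couple (land comp0 : List (List Int)) (n m : Nat) (cid : Int)
    (hcid : 0 ≤ cid) (q0 : List (Int × Int)) (k : Nat) (c : Int × Int)
    (sA : List (Int × Int) × List (List Int) × Int)
    (sB : List (Int × Int) × List (List Int))
    (hR : MidRel comp0 n m cid q0 k sA sB) :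
    MidRel comp0 n m cid q0 k (stepACell land (n : Int) (m : Int) sA c)
      (stepB land (n : Int) (m : Int) cid sB c) := by
  obtain ⟨cy, cx⟩ := c
  obtain ⟨⟨hshape, hlab, hnd, hok, horig⟩, hpre, hk, hq, hv, hcnt⟩ := hR
  have hguard : (pvGet2 0 sA.2.1 cy cx = 0) ↔ (pvGet2 (-1) sB.2 cy cx = -1) := by
    rw [hv, pvGet2_c2v, vis2_eq_zero]
  unfold stepACell stepB
  by_cases hg : 0 ≤ cy ∧ cy < (n : Int) ∧ 0 ≤ cx ∧ cx < (m : Int) ∧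
      pvGet2 0 land cy cx = 1 ∧ pvGet2 (-1) sB.2 cy cx = -1
  · obtain ⟨g1, g2, g3, g4, g5, g6⟩ := hg
    rw [if_pos ⟨g1, g2, g3, g4, g5, hguard.2 g6⟩, if_pos ⟨g1, g2, g3, g4, g5, g6⟩]
    have hnotin : (cy, cx) ∉ sB.1 := by
      intro hmem
      have := hlab cy cx g1 g3
      rw [if_pos hmem] at this
      omega
    have horigc : pvGet2 (-1) comp0 cy cx = -1 := by
      have := hlab cy cx g1 g3
      rw [if_neg hnotin] at this
      omega
    refine ⟨⟨gShape_set2 hshape cid g1 g3, ?_, ?_, ?_, ?_⟩, ?_, ?_, ?_, ?_, ?_⟩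
    · intro y x hy hx
      rw [pvGet2_set2 hshape cid g1 g2 g3 g4 (-1) hy hx]
      by_cases hc : (y, x) = (cy, cx)
      · obtain ⟨rfl, rfl⟩ := Prod.mk.injEq .. ▸ hc
        rw [if_pos (by simp), if_pos (by simp)]
      · have hyx : ¬(y = cy ∧ x = cx) := by
          intro ⟨h1, h2⟩; exact hc (by simp [h1, h2])
        rw [if_neg hyx, hlab y x hy hx]
        have : ((y, x) ∈ sB.1 ++ [(cy, cx)]) ↔ ((y, x) ∈ sB.1) := by
          simp only [List.mem_append, List.mem_singleton]
          tauto
        rw [if_congr this rfl rfl]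
    · rw [List.nodup_append]
      refine ⟨hnd, List.nodup_singleton _, ?_⟩
      intro a ha b hb heq
      rw [List.mem_singleton] at hb
      rw [heq, hb] at ha
      exact hnotin ha
    · intro d hd
      rcases List.mem_append.1 hd with h | h
      · exact hok d h
      · rw [List.mem_singleton] at h
        subst h
        exact ⟨g1, g2, g3, g4⟩
    · intro d hd
      rcases List.mem_append.1 hd with h | h
      · exact horig d h
      · rw [List.mem_singleton] at h
        subst h
        exact horigc
    · exact hpre.trans (List.prefix_append _ _)
    · simp only [List.length_append, List.length_singleton]
      omega
    · rw [hq, List.drop_append_of_le_length hk]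
    · rw [hv, c2v_set2 cid g1 g3]
      have : vis2 cid = 1 := by
        unfold vis2
        rw [if_neg (by omega)]
      rw [this]
    · rw [hcnt]
      simp only [List.length_append, List.length_singleton]
      push_cast
      ring
  · rw [if_neg hg, if_neg ?_]
    · exact ⟨⟨hshape, hlab, hnd, hok, horig⟩, hpre, hk, hq, hv, hcnt⟩
    · intro ⟨g1, g2, g3, g4, g5, g6⟩
      exact hg ⟨g1, g2, g3, g4, g5, hguard.1 g6⟩

theorem bfs_couple (land comp0 : List (List Int)) (n m : Nat) (cid : Int) (hcid : 0 ≤ cid) :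
    ∀ (fuel : Nat) (q : List (Int × Int)) (h : Int) (comp : List (List Int)),
      BCore comp0 n m cid q comp → 0 ≤ h → h ≤ (q.length : Int) →
      n * m < fuel + h.toNat →
      (bfsB land (n : Int) (m : Int) cid fuel q h comp).2.1
          = (((bfsB land (n : Int) (m : Int) cid fuel q h comp).1.length : Int)) ∧
      BCore comp0 n m cid (bfsB land (n : Int) (m : Int) cid fuel q h comp).1
          (bfsB land (n : Int) (m : Int) cid fuel q h comp).2.2 ∧
      q <+: (bfsB land (n : Int) (m : Int) cid fuel q h comp).1 ∧
      bfsA land (n : Int) (m : Int) fuel (q.drop h.toNat) (c2v comp) (q.length : Int)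
          (PySem.Set.ofList ((q.take h.toNat).map Prod.snd))
        = (c2v (bfsB land (n : Int) (m : Int) cid fuel q h comp).2.2,
           ((bfsB land (n : Int) (m : Int) cid fuel q h comp).1.length : Int),
           PySem.Set.ofList ((bfsB land (n : Int) (m : Int) cid fuel q h comp).1.map Prod.snd)) := by
  intro fuel
  induction fuel with
  | zero =>
    intro q h comp hB hh hle hfuel
    exfalso
    obtain ⟨hshape, hlab, hnd, hok, horig⟩ := hB
    have := q_len_le hnd hok
    omega
  | succ fuel ih =>
    intro q h comp hB hh hle hfuel
    by_cases hcond : h < (q.length : Int)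
    · have hhn : h.toNat < q.length := by omega
      have hyx : PySem.List.pyGetD q h ((0 : Int), (0 : Int)) = q[h.toNat] :=
        PySem.List.pyGetD_eq_getElem q _ hh (by omega)
      have hdrop : q.drop h.toNat = q[h.toNat] :: q.drop (h.toNat + 1) :=
        (List.getElem_cons_drop hhn).symm
      have hBfold : bfsB land (n : Int) (m : Int) cid (fuel + 1) q h comp
          = bfsB land (n : Int) (m : Int) cid fuel
              ((nbrsB q[h.toNat].1 q[h.toNat].2).foldl (stepB land (n : Int) (m : Int) cid) (q, comp)).1
              (h + 1)
              ((nbrsB q[h.toNat].1 q[h.toNat].2).foldl (stepB land (n : Int) (m : Int) cid) (q, comp)).2 := by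
        rw [bfsB, if_pos hcond, hyx]
      -- the coupled neighbour scan
      have hmid : MidRel comp0 n m cid q (h.toNat + 1)
          ((nbrsB q[h.toNat].1 q[h.toNat].2).foldl (stepACell land (n : Int) (m : Int))
            (q.drop (h.toNat + 1), c2v comp, (q.length : Int)))
          ((nbrsB q[h.toNat].1 q[h.toNat].2).foldl (stepB land (n : Int) (m : Int) cid) (q, comp)) := by
        refine pvFoldlRel _ _ _ _ ?_ ?_
        · exact ⟨hB, List.prefix_refl _, by show h.toNat + 1 ≤ q.length; omega, rfl, rfl, rfl⟩
        · intro c _ sA sB hR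
          exact push_couple land comp0 n m cid hcid q (h.toNat + 1) c sA sB hR
      set sB' := (nbrsB q[h.toNat].1 q[h.toNat].2).foldl (stepB land (n : Int) (m : Int) cid) (q, comp) with hsB'
      set sA' := (nbrsB q[h.toNat].1 q[h.toNat].2).foldl (stepACell land (n : Int) (m : Int))
            (q.drop (h.toNat + 1), c2v comp, (q.length : Int)) with hsA'
      obtain ⟨hBcore', hpre', hk', hq', hv', hcnt'⟩ := hmid
      have hA1 : (h + 1).toNat = h.toNat + 1 := by omega
      have hle2 : (h + 1) ≤ (sB'.1.length : Int) := by omega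
      have hfuel2 : n * m < fuel + (h + 1).toNat := by omega
      have ihh := ih sB'.1 (h + 1) sB'.2 hBcore' (by omega) hle2 hfuel2
      rw [hA1] at ihh
      have htakeq : sB'.1.take (h.toNat + 1) = q.take (h.toNat + 1) := by
        obtain ⟨t, ht⟩ := hpre'
        rw [← ht, List.take_append_of_le_length (by omega)]
      -- unfold one A step
      have hresE : PySem.Set.ofList ((q.take (h.toNat + 1)).map Prod.snd)
          = (if q[h.toNat].2 ∈ PySem.Set.ofList ((q.take h.toNat).map Prod.snd) then
              PySem.Set.ofList ((q.take h.toNat).map Prod.snd)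
            else PySem.Set.ofList ((q.take h.toNat).map Prod.snd) ++ [q[h.toNat].2]) := by
        have ht : q.take (h.toNat + 1) = q.take h.toNat ++ [q[h.toNat]] := by
          rw [List.take_add_one, List.getElem?_eq_getElem hhn]
          rfl
        rw [ht, List.map_append]
        exact ofList_snoc _ _
      have hstepA : ∀ (c : Int × Int) (rest : List (Int × Int)) (visited : List (List Int))
          (count : Int) (result : List Int),
          bfsA land (n : Int) (m : Int) (fuel + 1) (c :: rest) visited count result
            = bfsA land (n : Int) (m : Int) fuel
                (((nbrsB c.1 c.2).foldl (stepACell land (n : Int) (m : Int)) (rest, visited, count)).1)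
                (((nbrsB c.1 c.2).foldl (stepACell land (n : Int) (m : Int)) (rest, visited, count)).2.1)
                (((nbrsB c.1 c.2).foldl (stepACell land (n : Int) (m : Int)) (rest, visited, count)).2.2)
                (if c.2 ∈ result then result else result ++ [c.2]) := by
        intro c rest visited count result
        obtain ⟨py, px⟩ := c
        rw [bfsA, foldA_eq]
      have hAfold : bfsA land (n : Int) (m : Int) (fuel + 1) (q.drop h.toNat) (c2v comp)
            (q.length : Int) (PySem.Set.ofList ((q.take h.toNat).map Prod.snd))
          = bfsA land (n : Int) (m : Int) fuel sA'.1 sA'.2.1 sA'.2.2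
              (PySem.Set.ofList ((q.take (h.toNat + 1)).map Prod.snd)) := by
        rw [hdrop, hstepA, hresE, hsA']
      refine ⟨?_, ?_, ?_, ?_⟩
      · rw [hBfold]; exact ihh.1
      · rw [hBfold]; exact ihh.2.1
      · rw [hBfold]
        exact (hpre'.trans ihh.2.2.1)
      · rw [hAfold, hBfold, hq', hv', hcnt', ← htakeq]
        exact ihh.2.2.2
    · have heq : h = (q.length : Int) := by omega
      have hBstop : bfsB land (n : Int) (m : Int) cid (fuel + 1) q h comp = (q, h, comp) := by
        rw [bfsB, if_neg hcond]
      have hdrop : q.drop h.toNat = [] := by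
        rw [List.drop_eq_nil_iff]
        omega
      have htake : q.take h.toNat = q := by
        rw [List.take_of_length_le (by omega)]
      rw [hBstop, hdrop, htake]
      exact ⟨by rw [heq], hB, List.prefix_refl _, by rw [bfsA]⟩

theorem pyGetD_append_left (xs ys : List Int) {c : Int} (d : Int)
    (hc : 0 ≤ c) (hlt : c < (xs.length : Int)) :
    PySem.List.pyGetD (xs ++ ys) c d = PySem.List.pyGetD xs c d := by
  rw [PySem.List.pyGetD_of_nonneg _ _ hc, PySem.List.pyGetD_of_nonneg _ _ hc]
  rw [List.getD_eq_getElem?_getD, List.getD_eq_getElem?_getD]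
  rw [List.getElem?_append_left (by omega)]

theorem pyGetD_append_length (xs : List Int) (v d : Int) :
    PySem.List.pyGetD (xs ++ [v]) (xs.length : Int) d = v := by
  rw [pyGetD_eq_get?, PySem.List.pyGet?_append_length]
  rfl

theorem pySetD_map_pyRange (mm : Nat) (g : Int → Int) {l : Int} (v : Int)
    (hl : 0 ≤ l) (hlm : l < (mm : Int)) :
    PySem.List.pySetD ((PySem.List.pyRange 0 (mm : Int) 1).map g) l v
      = (PySem.List.pyRange 0 (mm : Int) 1).map (fun j => if j = l then v else g j) := by
  rw [PySem.List.pySetD_of_nonneg _ _ hl]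
  apply List.ext_getElem
  · simp
  · intro k h1 h2
    have hk : k < mm := by
      have := h2
      simp [PySem.List.length_pyRange_one] at this
      omega
    have hval : (PySem.List.pyRange 0 (mm : Int) 1)[k]'(by
        simp [PySem.List.length_pyRange_one]; omega) = (k : Int) := by
      rw [PySem.List.getElem_pyRange_one]
      omega
    simp only [List.getElem_set, List.getElem_map, hval]
    split_ifs <;> first | rfl | omega

theorem bumpA_map_range (mm : Nat) (count : Int) (g : Int → Int) {l : Int}
    (hl : 0 ≤ l) (hlm : l < (mm : Int)) :
    bumpA count ((PySem.List.pyRange 0 (mm : Int) 1).map g) l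
      = (PySem.List.pyRange 0 (mm : Int) 1).map (fun j => if j = l then g j + count else g j) := by
  unfold bumpA
  rw [PySem.List.pyGetD_map_pyRange_of_nonneg g (mm : Int) l 0 hl hlm]
  rw [pySetD_map_pyRange mm g (g l + count) hl hlm]
  apply List.map_congr_left
  intro j _
  by_cases hjl : j = l
  · simp [hjl]
  · simp [hjl]

theorem drain_map_range (mm : Nat) (count : Int) :
    ∀ (r : List Int), r.Nodup → (∀ l ∈ r, 0 ≤ l ∧ l < (mm : Int)) → ∀ (g : Int → Int),
    (r.reverse).foldl (bumpA count) ((PySem.List.pyRange 0 (mm : Int) 1).map g)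
      = (PySem.List.pyRange 0 (mm : Int) 1).map (fun j => g j + if j ∈ r then count else 0) := by
  intro r
  induction r with
  | nil =>
    intro _ _ g
    simp
  | cons l t ihr =>
    intro hnd hb g
    have hlb := hb l (by simp)
    rw [List.reverse_cons, List.foldl_append]
    rw [ihr (List.Nodup.of_cons hnd) (fun x hx => hb x (List.mem_cons_of_mem _ hx)) g]
    rw [List.foldl_cons, List.foldl_nil]
    rw [bumpA_map_range mm count _ hlb.1 hlb.2]
    apply List.map_congr_left
    intro j _
    have hlnt : l ∉ t := (List.nodup_cons.1 hnd).1
    by_cases hjl : j = l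
    · subst hjl
      rw [if_pos rfl, if_neg hlnt, if_pos (List.mem_cons_self ..)]
      ring
    · rw [if_neg hjl]
      by_cases hjt : j ∈ t
      · rw [if_pos hjt, if_pos (by simp [hjt])]
      · rw [if_neg hjt, if_neg (by simp [hjl, hjt])]

theorem colScanB_pos (comp : List (List Int)) (sizes : List Int) (j t i : Int) (s : List Int)
    (hg : pvGet2 (-1) comp i j ≠ -1 ∧ pvGet2 (-1) comp i j ∉ s) :
    colScanB comp sizes j (t, s) i
      = (t + PySem.List.pyGetD sizes (pvGet2 (-1) comp i j) 0,
         PySem.Set.add s (pvGet2 (-1) comp i j)) := by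
  unfold colScanB
  rw [if_pos hg]

theorem colScanB_neg (comp : List (List Int)) (sizes : List Int) (j t i : Int) (s : List Int)
    (hg : ¬(pvGet2 (-1) comp i j ≠ -1 ∧ pvGet2 (-1) comp i j ∉ s)) :
    colScanB comp sizes j (t, s) i = (t, s) := by
  unfold colScanB
  rw [if_neg hg]

theorem scan_total_add (comp : List (List Int)) (sizes : List Int) (j : Int) :
    ∀ (L : List Int) (t : Int) (s : List Int),
      (L.foldl (colScanB comp sizes j) (t, s)).1
          = t + (L.foldl (colScanB comp sizes j) (0, s)).1 ∧
        (L.foldl (colScanB comp sizes j) (t, s)).2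
          = (L.foldl (colScanB comp sizes j) (0, s)).2 := by
  intro L
  induction L with
  | nil => intro t s; simp
  | cons i L' ih =>
    intro t s
    rw [List.foldl_cons, List.foldl_cons]
    by_cases hg : pvGet2 (-1) comp i j ≠ -1 ∧ pvGet2 (-1) comp i j ∉ s
    · rw [colScanB_pos comp sizes j t i s hg, colScanB_pos comp sizes j 0 i s hg]
      set w := PySem.List.pyGetD sizes (pvGet2 (-1) comp i j) 0
      set s' := PySem.Set.add s (pvGet2 (-1) comp i j)
      obtain ⟨ha1, ha2⟩ := ih (t + w) s'
      obtain ⟨hb1, hb2⟩ := ih (0 + w) s'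
      obtain ⟨hc1, hc2⟩ := ih w s'
      refine ⟨?_, ?_⟩
      · rw [ha1, hb1]; ring
      · rw [ha2, hb2]
    · rw [colScanB_neg comp sizes j t i s hg, colScanB_neg comp sizes j 0 i s hg]
      exact ih t s

theorem scan_mono (comp : List (List Int)) (sizes : List Int) (j : Int)
    (hs : ∀ v ∈ sizes, 0 ≤ v) :
    ∀ (L : List Int) (t : Int) (s : List Int),
      t ≤ (L.foldl (colScanB comp sizes j) (t, s)).1 := by
  intro L
  induction L with
  | nil => intro t s; simp
  | cons i L' ih =>
    intro t s
    rw [List.foldl_cons]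
    by_cases hg : pvGet2 (-1) comp i j ≠ -1 ∧ pvGet2 (-1) comp i j ∉ s
    · rw [colScanB_pos comp sizes j t i s hg]
      have h1 := ih (t + PySem.List.pyGetD sizes (pvGet2 (-1) comp i j) 0)
        (PySem.Set.add s (pvGet2 (-1) comp i j))
      have h2 := pyGetD_nonneg_of_all hs (pvGet2 (-1) comp i j)
      omega
    · rw [colScanB_neg comp sizes j t i s hg]
      exact ih t s

theorem colTotal_nonneg (comp : List (List Int)) (sizes : List Int) (N j : Int)
    (hs : ∀ v ∈ sizes, 0 ≤ v) : 0 ≤ colTotal comp sizes N j := by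
  unfold colTotal
  exact scan_mono comp sizes j hs _ 0 _

theorem scan_all_neg (comp : List (List Int)) (sizes : List Int) (j : Int) :
    ∀ (L : List Int), (∀ i ∈ L, pvGet2 (-1) comp i j = -1) → ∀ (t : Int) (s : List Int),
      L.foldl (colScanB comp sizes j) (t, s) = (t, s) := by
  intro L
  induction L with
  | nil => intro _ t s; rfl
  | cons i L' ih =>
    intro hL t s
    rw [List.foldl_cons, colScanB_neg comp sizes j t i s (by simp [hL i (by simp)])]
    exact ih (fun i' hi' => hL i' (by simp [hi'])) t s

theorem colTotal_init (n m : Nat) (j : Int) :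
    colTotal (List.replicate n (List.replicate m (-1 : Int))) [] (n : Int) j = 0 := by
  unfold colTotal
  rw [scan_all_neg _ _ _ _ ?_ 0 _]
  · intro i _
    exact pvGet2_replicate n m i j

theorem scan_seen (comp comp' : List (List Int)) (sizes : List Int) (count cid j : Int)
    (q' : List (Int × Int))
    (hlab' : ∀ y x : Int, 0 ≤ y → 0 ≤ x →
      pvGet2 (-1) comp' y x = if (y, x) ∈ q' then cid else pvGet2 (-1) comp y x)
    (horig : ∀ c ∈ q', pvGet2 (-1) comp c.1 c.2 = -1)
    (hold : ∀ y x : Int, 0 ≤ y → 0 ≤ x → pvGet2 (-1) comp y x = -1 ∨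
      (0 ≤ pvGet2 (-1) comp y x ∧ pvGet2 (-1) comp y x < (sizes.length : Int)))
    (hcid : cid = (sizes.length : Int)) (hj : 0 ≤ j) :
    ∀ (L : List Int), (∀ i ∈ L, 0 ≤ i) → ∀ (t : Int) (s s' : List Int),
      cid ∈ s' → (∀ v : Int, v ≠ cid → (v ∈ s' ↔ v ∈ s)) →
      (L.foldl (colScanB comp' (sizes ++ [count]) j) (t, s')).1
        = (L.foldl (colScanB comp sizes j) (t, s)).1 := by
  intro L
  induction L with
  | nil => intro _ t s s' _ _; rfl
  | cons i L' ih =>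
    intro hL t s s' hmem hrel
    have hi : (0 : Int) ≤ i := hL i (by simp)
    have hL' : ∀ i' ∈ L', (0 : Int) ≤ i' := fun i' hi' => hL i' (by simp [hi'])
    rw [List.foldl_cons, List.foldl_cons]
    by_cases hq : (i, j) ∈ q'
    · have hv' : pvGet2 (-1) comp' i j = cid := by rw [hlab' i j hi hj, if_pos hq]
      have hv : pvGet2 (-1) comp i j = -1 := horig (i, j) hq
      rw [colScanB_neg comp' (sizes ++ [count]) j t i s' (by
        rw [hv']; intro ⟨_, hns⟩; exact hns hmem)]
      rw [colScanB_neg comp sizes j t i s (by rw [hv]; simp)]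
      exact ih hL' t s s' hmem hrel
    · have hv' : pvGet2 (-1) comp' i j = pvGet2 (-1) comp i j := by
        rw [hlab' i j hi hj, if_neg hq]
      by_cases hneg : pvGet2 (-1) comp i j = -1
      · rw [colScanB_neg comp' (sizes ++ [count]) j t i s' (by rw [hv', hneg]; simp)]
        rw [colScanB_neg comp sizes j t i s (by rw [hneg]; simp)]
        exact ih hL' t s s' hmem hrel
      · have hrg := hold i j hi hj
        have hne : pvGet2 (-1) comp i j ≠ cid := by omega
        by_cases hs : pvGet2 (-1) comp i j ∈ s
        · rw [colScanB_neg comp' (sizes ++ [count]) j t i s' (by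
            rw [hv']; intro ⟨_, hns⟩; exact hns ((hrel _ hne).2 hs))]
          rw [colScanB_neg comp sizes j t i s (by intro ⟨_, hns⟩; exact hns hs)]
          exact ih hL' t s s' hmem hrel
        · rw [colScanB_pos comp' (sizes ++ [count]) j t i s' (by
            rw [hv']; exact ⟨hneg, fun hc => hs ((hrel _ hne).1 hc)⟩)]
          rw [colScanB_pos comp sizes j t i s ⟨hneg, hs⟩]
          rw [hv']
          rw [pyGetD_append_left sizes [count] 0 (by omega) (by omega)]
          apply ih hL'
          · rw [PySem.Set.mem_add]
            exact Or.inl hmem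
          · intro v hv
            rw [PySem.Set.mem_add, PySem.Set.mem_add, hrel v hv]
  
theorem scan_fresh (comp comp' : List (List Int)) (sizes : List Int) (count cid j : Int)
    (q' : List (Int × Int))
    (hlab' : ∀ y x : Int, 0 ≤ y → 0 ≤ x →
      pvGet2 (-1) comp' y x = if (y, x) ∈ q' then cid else pvGet2 (-1) comp y x)
    (horig : ∀ c ∈ q', pvGet2 (-1) comp c.1 c.2 = -1)
    (hold : ∀ y x : Int, 0 ≤ y → 0 ≤ x → pvGet2 (-1) comp y x = -1 ∨
      (0 ≤ pvGet2 (-1) comp y x ∧ pvGet2 (-1) comp y x < (sizes.length : Int)))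
    (hcid : cid = (sizes.length : Int)) (hj : 0 ≤ j) :
    ∀ (L : List Int), (∀ i ∈ L, 0 ≤ i) → ∀ (t : Int) (s : List Int), cid ∉ s →
      (L.foldl (colScanB comp' (sizes ++ [count]) j) (t, s)).1
        = (L.foldl (colScanB comp sizes j) (t, s)).1
            + (if (∃ i ∈ L, (i, j) ∈ q') then count else 0) := by
  intro L
  induction L with
  | nil => intro _ t s _; simp
  | cons i L' ih =>
    intro hL t s hns
    have hi : (0 : Int) ≤ i := hL i (by simp)
    have hL' : ∀ i' ∈ L', (0 : Int) ≤ i' := fun i' hi' => hL i' (by simp [hi'])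
    rw [List.foldl_cons, List.foldl_cons]
    by_cases hq : (i, j) ∈ q'
    · have hv' : pvGet2 (-1) comp' i j = cid := by rw [hlab' i j hi hj, if_pos hq]
      have hv : pvGet2 (-1) comp i j = -1 := horig (i, j) hq
      rw [colScanB_pos comp' (sizes ++ [count]) j t i s (by
        rw [hv']; exact ⟨by omega, hns⟩)]
      rw [colScanB_neg comp sizes j t i s (by rw [hv]; simp)]
      rw [hv', hcid, pyGetD_append_length]
      have hseen := scan_seen comp comp' sizes count cid j q' hlab' horig hold hcid hj L' hL'
        (t + count) s (PySem.Set.add s cid)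
        (by rw [PySem.Set.mem_add]; exact Or.inr rfl)
        (by intro v hv2; rw [PySem.Set.mem_add]; constructor
            · rintro (h | h)
              · exact h
              · exact absurd h hv2
            · exact Or.inl)
      rw [← hcid, hseen]
      rw [if_pos ⟨i, by simp, hq⟩]
      obtain ⟨h1, _⟩ := scan_total_add comp sizes j L' (t + count) s
      obtain ⟨h2, _⟩ := scan_total_add comp sizes j L' t s
      rw [h1, h2]
      ring
    · have hv' : pvGet2 (-1) comp' i j = pvGet2 (-1) comp i j := by
        rw [hlab' i j hi hj, if_neg hq]
      have hcond : (∃ i' ∈ (i :: L'), (i', j) ∈ q') ↔ (∃ i' ∈ L', (i', j) ∈ q') := by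
        constructor
        · rintro ⟨i', hi', hq'⟩
          rcases List.mem_cons.1 hi' with h | h
          · subst h; exact absurd hq' hq
          · exact ⟨i', h, hq'⟩
        · rintro ⟨i', hi', hq'⟩
          exact ⟨i', by simp [hi'], hq'⟩
      rw [if_congr hcond rfl rfl]
      by_cases hneg : pvGet2 (-1) comp i j = -1
      · rw [colScanB_neg comp' (sizes ++ [count]) j t i s (by rw [hv', hneg]; simp)]
        rw [colScanB_neg comp sizes j t i s (by rw [hneg]; simp)]
        exact ih hL' t s hns
      · have hrg := hold i j hi hj
        have hne : pvGet2 (-1) comp i j ≠ cid := by omega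
        by_cases hsm : pvGet2 (-1) comp i j ∈ s
        · rw [colScanB_neg comp' (sizes ++ [count]) j t i s (by
            rw [hv']; intro ⟨_, hns2⟩; exact hns2 hsm)]
          rw [colScanB_neg comp sizes j t i s (by intro ⟨_, hns2⟩; exact hns2 hsm)]
          exact ih hL' t s hns
        · rw [colScanB_pos comp' (sizes ++ [count]) j t i s (by rw [hv']; exact ⟨hneg, hsm⟩)]
          rw [colScanB_pos comp sizes j t i s ⟨hneg, hsm⟩]
          rw [hv', pyGetD_append_left sizes [count] 0 (by omega) (by omega)]
          apply ih hL'
          rw [PySem.Set.mem_add]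
          rintro (h | h)
          · exact hns h
          · exact hne h.symm

theorem colTotal_step (n m : Nat) (comp comp' : List (List Int)) (sizes : List Int)
    (count cid j : Int) (q' : List (Int × Int))
    (hlab' : ∀ y x : Int, 0 ≤ y → 0 ≤ x →
      pvGet2 (-1) comp' y x = if (y, x) ∈ q' then cid else pvGet2 (-1) comp y x)
    (horig : ∀ c ∈ q', pvGet2 (-1) comp c.1 c.2 = -1)
    (hold : ∀ y x : Int, 0 ≤ y → 0 ≤ x → pvGet2 (-1) comp y x = -1 ∨
      (0 ≤ pvGet2 (-1) comp y x ∧ pvGet2 (-1) comp y x < (sizes.length : Int)))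
    (hcid : cid = (sizes.length : Int)) (hok : cellsOK n m q') (hj : 0 ≤ j) :
    colTotal comp' (sizes ++ [count]) (n : Int) j
      = colTotal comp sizes (n : Int) j
          + (if j ∈ PySem.Set.ofList (q'.map Prod.snd) then count else 0) := by
  unfold colTotal
  rw [scan_fresh comp comp' sizes count cid j q' hlab' horig hold hcid hj
    (PySem.List.pyRange 0 (n : Int) 1)
    (fun i hi => (PySem.List.mem_pyRange_one.1 hi).1) 0 PySem.Set.empty (by simp [PySem.Set.empty])]
  congr 1
  have hiff : (∃ i ∈ PySem.List.pyRange 0 (n : Int) 1, (i, j) ∈ q')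
      ↔ j ∈ PySem.Set.ofList (q'.map Prod.snd) := by
    rw [PySem.Set.mem_ofList, List.mem_map]
    constructor
    · rintro ⟨i, _, hq⟩
      exact ⟨(i, j), hq, rfl⟩
    · rintro ⟨c, hc, hsnd⟩
      refine ⟨c.1, ?_, ?_⟩
      · obtain ⟨h1, h2, _, _⟩ := hok c hc
        exact PySem.List.mem_pyRange_one.2 ⟨h1, h2⟩
      · rw [← hsnd]
        exact hc
  rw [if_congr hiff rfl rfl]

def OInv (n m : Nat) (stA : List (List Int) × List Int)
    (stB : List (List Int) × List Int) : Prop :=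
  gShape stB.1 n m ∧ stA.1 = c2v stB.1 ∧
    (∀ y x : Int, 0 ≤ y → 0 ≤ x → pvGet2 (-1) stB.1 y x = -1 ∨
      (0 ≤ pvGet2 (-1) stB.1 y x ∧ pvGet2 (-1) stB.1 y x < (stB.2.length : Int))) ∧
    (∀ v ∈ stB.2, 0 ≤ v) ∧
    stA.2 = (PySem.List.pyRange 0 (m : Int) 1).map (fun j => colTotal stB.1 stB.2 (n : Int) j)

theorem outer_step (land : List (List Int)) (n m : Nat) (i j : Int)
    (hi : 0 ≤ i) (hin : i < (n : Int)) (hj : 0 ≤ j) (hjm : j < (m : Int))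
    (stA stB : List (List Int) × List Int) (hO : OInv n m stA stB) :
    OInv n m
      (if pvGet2 0 land i j = 1 ∧ pvGet2 0 stA.1 i j = 0 then
        ((bfsA land (n : Int) (m : Int) (n * m + 1) [(i, j)] (pvSet2 stA.1 i j 1) 1 []).1,
         (((bfsA land (n : Int) (m : Int) (n * m + 1) [(i, j)] (pvSet2 stA.1 i j 1) 1 []).2.2.reverse).foldl
           (bumpA (bfsA land (n : Int) (m : Int) (n * m + 1) [(i, j)] (pvSet2 stA.1 i j 1) 1 []).2.1) stA.2))
       else stA)
      (if pvGet2 0 land i j = 1 ∧ pvGet2 (-1) stB.1 i j = -1 then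
        ((bfsB land (n : Int) (m : Int) (stB.2.length : Int) (n * m + 1) [(i, j)] 0
            (pvSet2 stB.1 i j (stB.2.length : Int))).2.2,
         stB.2 ++ [((bfsB land (n : Int) (m : Int) (stB.2.length : Int) (n * m + 1) [(i, j)] 0
            (pvSet2 stB.1 i j (stB.2.length : Int))).1.length : Int)])
       else stB) := by
  obtain ⟨hshape, hvis, hrange, hsizes, hcheck⟩ := hO
  have hguard : (pvGet2 0 stA.1 i j = 0) ↔ (pvGet2 (-1) stB.1 i j = -1) := by
    rw [hvis, pvGet2_c2v, vis2_eq_zero]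
  by_cases hg : pvGet2 0 land i j = 1 ∧ pvGet2 (-1) stB.1 i j = -1
  · rw [if_pos ⟨hg.1, hguard.2 hg.2⟩, if_pos hg]
    set cid : Int := (stB.2.length : Int) with hciddef
    have hcid : 0 ≤ cid := by positivity
    set comp1 := pvSet2 stB.1 i j cid with hcomp1
    have hBC : BCore stB.1 n m cid [(i, j)] comp1 := by
      refine ⟨gShape_set2 hshape cid hi hj, ?_, List.nodup_singleton _, ?_, ?_⟩
      · intro y x hy hx
        rw [pvGet2_set2 hshape cid hi hin hj hjm (-1) hy hx]
        by_cases hc : (y, x) = (i, j)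
        · obtain ⟨rfl, rfl⟩ := Prod.mk.injEq .. ▸ hc
          rw [if_pos (by simp), if_pos (by simp)]
        · have hyx : ¬(y = i ∧ x = j) := by
            intro ⟨h1, h2⟩; exact hc (by simp [h1, h2])
          rw [if_neg hyx, if_neg (by simp only [List.mem_singleton]; intro hc; exact hyx (by 
              exact ⟨congrArg Prod.fst hc, congrArg Prod.snd hc⟩))]
      · intro c hc
        rw [List.mem_singleton] at hc
        subst hc
        exact ⟨hi, hin, hj, hjm⟩
      · intro c hc
        rw [List.mem_singleton] at hc
        subst hc
        exact hg.2
    have couple := bfs_couple land stB.1 n m cid hcid (n * m + 1) [(i, j)] 0 comp1 hBC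
      (le_refl 0) (by simp) (by omega)
    set r := bfsB land (n : Int) (m : Int) cid (n * m + 1) [(i, j)] 0 comp1 with hrdef
    obtain ⟨hlen', hBC', hpre', hAeq⟩ := couple
    obtain ⟨hshape', hlab', hnd', hok', horig'⟩ := hBC'
    have hvis1 : c2v comp1 = pvSet2 stA.1 i j 1 := by
      rw [hcomp1, c2v_set2 cid hi hj, hvis]
      have h1 : vis2 cid = 1 := by
        unfold vis2
        rw [if_neg (by omega)]
      rw [h1]
    have hA : bfsA land (n : Int) (m : Int) (n * m + 1) [(i, j)] (pvSet2 stA.1 i j 1) 1 []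
        = (c2v r.2.2, (r.1.length : Int), PySem.Set.ofList (r.1.map Prod.snd)) := by
      rw [← hvis1]
      have h0 : (Int.toNat 0) = 0 := rfl
      have hd : ([(i, j)] : List (Int × Int)).drop 0 = [(i, j)] := rfl
      have ht : PySem.Set.ofList ((([(i, j)] : List (Int × Int)).take 0).map Prod.snd)
          = ([] : List Int) := rfl
      have hc1 : (([(i, j)] : List (Int × Int)).length : Int) = 1 := by simp
      rw [h0, hd, ht, hc1] at hAeq
      exact hAeq
    rw [hA]
    set q' := r.1 with hq'def
    set comp' := r.2.2 with hcomp'def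
    set count : Int := (q'.length : Int) with hcountdef
    refine ⟨hshape', rfl, ?_, ?_, ?_⟩
    · intro y x hy hx
      have := hlab' y x hy hx
      by_cases hmem : (y, x) ∈ q'
      · rw [this, if_pos hmem]
        right
        constructor
        · omega
        · simp only [List.length_append, List.length_singleton]
          push_cast
          omega
      · rw [this, if_neg hmem]
        rcases hrange y x hy hx with h | h
        · left; exact h
        · right
          refine ⟨h.1, ?_⟩
          simp only [List.length_append, List.length_singleton]
          push_cast
          omega
    · intro v hv
      rcases List.mem_append.1 hv with h | h
      · exact hsizes v h
      · rw [List.mem_singleton] at h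
        subst h
        positivity
    · rw [hcheck]
      have hdrain := drain_map_range m count (PySem.Set.ofList (q'.map Prod.snd))
        (PySem.Set.nodup_ofList _)
        (by
          intro l hl
          rw [PySem.Set.mem_ofList, List.mem_map] at hl
          obtain ⟨c, hc, rfl⟩ := hl
          obtain ⟨_, _, h3, h4⟩ := hok' c hc
          exact ⟨h3, h4⟩)
        (fun j' => colTotal stB.1 stB.2 (n : Int) j')
      rw [hdrain]
      apply List.map_congr_left
      intro j' hj'
      have hj'0 : (0 : Int) ≤ j' := (PySem.List.mem_pyRange_one.1 hj').1
      rw [colTotal_step n m stB.1 comp' stB.2 count cid j' q' hlab' horig' hrange hciddef hok' hj'0]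
  · have hgA : ¬(pvGet2 0 land i j = 1 ∧ pvGet2 0 stA.1 i j = 0) := by
      intro ⟨h1, h2⟩
      exact hg ⟨h1, hguard.1 h2⟩
    rw [if_neg hgA, if_neg hg]
    exact ⟨hshape, hvis, hrange, hsizes, hcheck⟩

theorem final_max (m : Nat) (hm : 0 < m) (f : Int → Int) (hf : ∀ j, 0 ≤ f j) :
    (match PySem.List.max? ((PySem.List.pyRange 0 (m : Int) 1).map f) (fun v => v) with
     | some v => v
     | none => 0)
      = (PySem.List.pyRange 0 (m : Int) 1).foldl
          (fun best j => if f j > best then f j else best) 0 := by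
  have hr : PySem.List.pyRange 0 (m : Int) 1 = 0 :: PySem.List.pyRange 1 (m : Int) 1 := by
    have := PySem.List.pyRange_one_cons (a := 0) (b := (m : Int)) (by omega)
    simpa using this
  rw [hr, List.map_cons, PySem.List.max?_id_cons, List.foldl_cons]
  simp only
  have h0 : (if f 0 > 0 then f 0 else (0 : Int)) = f 0 := by
    have := hf 0
    split <;> omega
  rw [h0, List.foldl_map]
  apply PySem.List.foldl_congr_mem
  intro acc x _
  rw [max_def]
  split_ifs <;> omega

theorem folds_OInv (land : List (List Int)) (n m : Nat) :
    OInv n m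
      ((PySem.List.pyRange 0 (n : Int) 1).foldl (fun st i =>
        (PySem.List.pyRange 0 (m : Int) 1).foldl (fun (st : List (List Int) × List Int) j =>
          if pvGet2 0 land i j = 1 ∧ pvGet2 0 st.1 i j = 0 then
            ((bfsA land (n : Int) (m : Int) (n * m + 1) [(i, j)] (pvSet2 st.1 i j 1) 1 []).1,
             (((bfsA land (n : Int) (m : Int) (n * m + 1) [(i, j)] (pvSet2 st.1 i j 1) 1 []).2.2.reverse).foldl
               (bumpA (bfsA land (n : Int) (m : Int) (n * m + 1) [(i, j)] (pvSet2 st.1 i j 1) 1 []).2.1) st.2))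
          else st) st)
        (List.replicate n (List.replicate m 0), List.replicate m (0 : Int)))
      ((PySem.List.pyRange 0 (n : Int) 1).foldl (fun st i =>
        (PySem.List.pyRange 0 (m : Int) 1).foldl (fun (st : List (List Int) × List Int) j =>
          if pvGet2 0 land i j = 1 ∧ pvGet2 (-1) st.1 i j = -1 then
            ((bfsB land (n : Int) (m : Int) (st.2.length : Int) (n * m + 1) [(i, j)] 0
                (pvSet2 st.1 i j (st.2.length : Int))).2.2,
             st.2 ++ [((bfsB land (n : Int) (m : Int) (st.2.length : Int) (n * m + 1) [(i, j)] 0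
                (pvSet2 st.1 i j (st.2.length : Int))).1.length : Int)])
          else st) st)
        (List.replicate n (List.replicate m (-1 : Int)), ([] : List Int))) := by
  apply pvFoldlRel
  · refine ⟨gShape_replicate n m, (c2v_replicate n m).symm, ?_, by simp, ?_⟩
    · intro y x hy hx
      left
      exact pvGet2_replicate n m y x
    · calc List.replicate m (0 : Int)
          = List.replicate (PySem.List.pyRange 0 (m : Int) 1).length (0 : Int) := by
            rw [PySem.List.length_pyRange_one]
            simp
        _ = (PySem.List.pyRange 0 (m : Int) 1).map (fun _ => (0 : Int)) := by
            rw [List.map_const']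
        _ = (PySem.List.pyRange 0 (m : Int) 1).map (fun j =>
              colTotal (List.replicate n (List.replicate m (-1 : Int))) [] (n : Int) j) := by
            apply List.map_congr_left
            intro j _
            rw [colTotal_init n m j]
  · intro i hi stA stB hR
    obtain ⟨h0i, hin⟩ := PySem.List.mem_pyRange_one.1 hi
    apply pvFoldlRel
    · exact hR
    · intro j hj sA sB hR2
      obtain ⟨h0j, hjm⟩ := PySem.List.mem_pyRange_one.1 hj
      exact outer_step land n m i j h0i hin h0j hjm sA sB hR2

theorem main_eq (land : List (List Int)) (hpre : Pre_solution land) :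
    solution land = solution_alt land := by
  obtain ⟨hne, hr0, _⟩ := hpre
  have hm0 : 0 < (PySem.List.pyGetD land 0 ([] : List Int)).length := by
    cases h : PySem.List.pyGetD land 0 ([] : List Int) with
    | nil => exact absurd h hr0
    | cons a t => simp
  unfold solution solution_alt
  dsimp only
  obtain ⟨hshape, hvis, hrange, hsizes, hcheck⟩ :=
    folds_OInv land land.length (PySem.List.pyGetD land 0 ([] : List Int)).length
  rw [hcheck]
  rw [final_max _ hm0 _ (fun j => colTotal_nonneg _ _ _ _ hsizes)]

-- ===== VERDICT (by name: the statement is the Claim_ definition above) =====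
theorem solution_spec : Claim_equal_solution := by
  intro land _ hpre
  show solution land = solution_alt land
  exact main_eq land hpre
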